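-- pv_equiv track=rewrite | github.com/kabeer28/wordtoverilog | backend/app/services/verifiers/latch_checker.py | _extract_always_comb_blocks
-- ===== SOURCE A (Python) =====
-- def _extract_always_comb_blocks(code: str) -> list[str]:
--     blocks: list[str] = []
--     lines = code.splitlines()
--     i = 0
--     while i < len(lines):
--         line = lines[i]
--         if "always @(*)" not in line:
--             i += 1
--             continue
--
--         block_lines: list[str] = [line]
--         begin_depth = line.count("begin") - line.count("end")
--         i += 1
--
--         while i < len(lines):
--             block_lines.append(lines[i])
--             begin_depth += lines[i].count("begin") - lines[i].count("end")
--             if begin_depth <= 0 and "begin" in block_lines[0]: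
--                 break
--             if begin_depth <= 0 and "begin" not in block_lines[0]:
--                 break
--             i += 1
--
--         blocks.append("\n".join(block_lines))
--         i += 1
--     return blocks
-- ===== SOURCE B (Python) =====
-- def _extract_always_comb_blocks(code: str) -> list[str]:
--     lines = code.splitlines()
--     n = len(lines)
--     # Stage 1: prefix[j] = net begin/end nesting depth of lines[0:j], computed once.
--     prefix = [0]
--     for l in lines:
--         prefix.append(prefix[-1] + l.count("begin") - l.count("end"))
--     # Stage 2: jump from marker to marker; a block starting at k ends right before the
--     # first j >= k+2 with prefix[j] <= prefix[k] (the start line always takes at least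
--     # one following line with it), or runs to the end of input.
--     blocks: list[str] = []
--     k = 0
--     while k < n:
--         if "always @(*)" in lines[k]:
--             stop = n
--             for j in range(k + 2, n + 1):
--                 if prefix[j] <= prefix[k]:
--                     stop = j
--                     break
--             blocks.append("\n".join(lines[k:stop]))
--             k = stop
--         else:
--             k += 1
--     return blocks
-- ===== Notes on version B (the rewrite author's own statement) =====
-- stated objective: alternative
-- what changed: B precomputes a prefix-sum table of per-line begin/end depth deltas in a first pass, then jumps from marker to marker finding each block's end by searching for the first index whose prefix sum drops back to the start's prefix, instead of A's running-depth counter in a nested consuming while loop.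
import Mathlib
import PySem

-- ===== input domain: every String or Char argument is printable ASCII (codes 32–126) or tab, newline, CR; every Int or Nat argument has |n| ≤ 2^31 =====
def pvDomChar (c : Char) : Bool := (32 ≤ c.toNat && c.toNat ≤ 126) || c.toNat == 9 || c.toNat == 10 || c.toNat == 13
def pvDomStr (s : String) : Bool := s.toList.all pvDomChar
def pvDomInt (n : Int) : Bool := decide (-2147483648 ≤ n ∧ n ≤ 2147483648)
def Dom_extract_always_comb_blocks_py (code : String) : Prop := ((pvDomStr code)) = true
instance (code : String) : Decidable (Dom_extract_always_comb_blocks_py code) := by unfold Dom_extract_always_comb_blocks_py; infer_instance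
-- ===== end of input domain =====

-- B replaces A's running-depth scan (outer index loop + nested consuming while) by a two-stage
-- pass: a precomputed prefix-sum table of begin/end nesting depths, then marker-to-marker jumps
-- that find each block's end by comparing prefix sums against the start's prefix (objective: alternative).

-- ===== PORT A =====
-- inner 'while i < len(lines): …' loop of A: consumes lines, returns (block_lines, remaining lines after the break)
def pvAInner : List String → List String → Int → (List String × List String)
  | [], acc, _ => (acc, [])
  | l :: rest, acc, depth =>
    let acc' := acc ++ [l]
    let d' := depth + (PySem.Str.count l "begin" : Int) - (PySem.Str.count l "end" : Int)
    if d' ≤ 0 ∧ PySem.Str.isIn "begin" (acc'.headD "") = true then (acc', rest)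
    else if d' ≤ 0 ∧ PySem.Str.isIn "begin" (acc'.headD "") = false then (acc', rest)
    else pvAInner rest acc' d'

-- needed by pvAOuter's termination: the inner loop never returns more lines than it was given
theorem pvAInner_snd_len : ∀ (rest acc : List String) (d : Int),
    (pvAInner rest acc d).2.length ≤ rest.length := by
  intro rest
  induction rest with
  | nil => intro acc d; simp [pvAInner]
  | cons l rest ih =>
    intro acc d
    simp only [pvAInner]
    split_ifs with h1 h2
    · simp
    · simp
    · exact le_trans (ih _ _) (by simp)

-- outer 'while i < len(lines): …' loop of A
def pvAOuter : List String → List String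
  | [] => []
  | line :: rest =>
    if PySem.Str.isIn "always @(*)" line then
      let r := pvAInner rest [line] ((PySem.Str.count line "begin" : Int) - (PySem.Str.count line "end" : Int))
      PySem.Str.join "\n" r.1 :: pvAOuter r.2
    else pvAOuter rest
termination_by lines => lines.length
decreasing_by
  · exact Nat.lt_succ_of_le (pvAInner_snd_len _ _ _)
  · simp

def extract_always_comb_blocks_py (code : String) : List String :=
  pvAOuter (PySem.Str.splitlines code)

-- ===== PORT B =====
-- stage 1 of B: the loop 'for l in lines: prefix.append(prefix[-1] + …)' building the prefix-sum table
def pvBPrefix : List Int → List String → List Int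
  | p, [] => p
  | p, l :: rest =>
      pvBPrefix (p ++ [p.getLastD 0 + ((PySem.Str.count l "begin" : Int) - (PySem.Str.count l "end" : Int))]) rest

-- B's inner 'for j in range(k+2, n+1): if prefix[j] <= prefix[k]: stop = j; break' (default stop = n);
-- indices j are always in range of prefix, so prefix[j] is ported as getD _ 0 (exact here)
def pvBStop (pref : List Int) (pk : Int) (j n : Nat) : Nat :=
  if j ≤ n then (if pref.getD j 0 ≤ pk then j else pvBStop pref pk (j + 1) n) else n
termination_by n + 1 - j

-- needed by pvBOuter's termination: the stop index lies strictly beyond the block start k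
theorem pvBStop_gt (pref : List Int) (pk : Int) :
    ∀ (m j n k : Nat), n + 1 - j ≤ m → k < n → k + 2 ≤ j → k < pvBStop pref pk j n := by
  intro m
  induction m with
  | zero =>
    intro j n k hm hkn hj
    unfold pvBStop
    have : ¬ j ≤ n := by omega
    simp [this]; omega
  | succ m ih =>
    intro j n k hm hkn hj
    unfold pvBStop
    split_ifs with h1 h2
    · omega
    · exact ih (j + 1) n k (by omega) hkn (by omega)
    · omega

-- stage 2 of B: 'while k < n: …' jumping from marker to marker via the prefix table
def pvBOuter (lines : List String) (pref : List Int) (k : Nat) : List String :=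
  if hk : k < lines.length then
    if PySem.Str.isIn "always @(*)" (lines.getD k "") then
      let stop := pvBStop pref (pref.getD k 0) (k + 2) lines.length
      PySem.Str.join "\n" (PySem.List.slice lines (some (k : Int)) (some (stop : Int))) ::
        pvBOuter lines pref stop
    else pvBOuter lines pref (k + 1)
  else []
termination_by lines.length - k
decreasing_by
  · have := pvBStop_gt pref (pref.getD k 0) (lines.length + 1 - (k + 2)) (k + 2) lines.length k
      (le_refl _) hk (by omega)
    omega
  · omega

def extract_always_comb_blocks_py_alt (code : String) : List String :=
  pvBOuter (PySem.Str.splitlines code) (pvBPrefix [0] (PySem.Str.splitlines code)) 0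

-- ===== PRECONDITION & SPEC =====
def Spec_extract_always_comb_blocks_py (code : String) (out : List String) : Prop := out = extract_always_comb_blocks_py_alt code
instance (code : String) (out : List String) : Decidable (Spec_extract_always_comb_blocks_py code out) := by unfold Spec_extract_always_comb_blocks_py; infer_instance

-- ===== CLAIM (what is proved, stated in full; the proofs are below) =====
def Claim_equal_extract_always_comb_blocks_py : Prop := ∀ (code : String), Dom_extract_always_comb_blocks_py code → Spec_extract_always_comb_blocks_py code (extract_always_comb_blocks_py code)

-- ===== LEMMAS AND PROOFS =====

-- net begin/end delta of one line
def pvDel (l : String) : Int := (PySem.Str.count l "begin" : Int) - (PySem.Str.count l "end" : Int)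

-- running sums of deltas (tail of the prefix table)
def pvScan (s : Int) : List String → List Int
  | [] => []
  | l :: r => (s + pvDel l) :: pvScan (s + pvDel l) r

-- number of lines A's inner loop consumes from 'rest' starting at depth d
def pvCut : List String → Int → Nat
  | [], _ => 0
  | l :: r, d => if d + pvDel l ≤ 0 then 1 else 1 + pvCut r (d + pvDel l)

theorem pvBPrefix_eq_scan : ∀ (lines : List String) (p : List Int),
    pvBPrefix p lines = p ++ pvScan (p.getLastD 0) lines := by
  intro lines
  induction lines with
  | nil => intro p; simp [pvBPrefix, pvScan]
  | cons l r ih =>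
    intro p
    have hδ : p.getLastD 0 + ((PySem.Str.count l "begin" : Int) - (PySem.Str.count l "end" : Int))
        = p.getLastD 0 + pvDel l := by unfold pvDel; ring
    simp only [pvBPrefix, pvScan, hδ]
    rw [ih]
    simp

theorem pvScan_step : ∀ (lines : List String) (s : Int) (i : Nat), i < lines.length →
    (s :: pvScan s lines).getD (i + 1) 0 = (s :: pvScan s lines).getD i 0 + pvDel (lines.getD i "") := by
  intro lines
  induction lines with
  | nil => intro s i h; simp at h
  | cons l r ih =>
    intro s i h
    cases i with
    | zero => simp [pvScan]
    | succ i =>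
      have := ih (s + pvDel l) i (by simpa using h)
      simpa [pvScan] using this

theorem pvPrefStep (lines : List String) (i : Nat) (h : i < lines.length) :
    (pvBPrefix [0] lines).getD (i + 1) 0
      = (pvBPrefix [0] lines).getD i 0 + pvDel (lines.getD i "") := by
  rw [pvBPrefix_eq_scan]
  simpa using pvScan_step lines 0 i h

theorem pvAInner_eq_cut : ∀ (rest acc : List String) (d : Int),
    pvAInner rest acc d = (acc ++ rest.take (pvCut rest d), rest.drop (pvCut rest d)) := by
  intro rest
  induction rest with
  | nil => intro acc d; simp [pvAInner, pvCut]
  | cons l r ih =>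
    intro acc d
    have hδ : d + (PySem.Str.count l "begin" : Int) - (PySem.Str.count l "end" : Int)
        = d + pvDel l := by unfold pvDel; ring
    simp only [pvAInner, hδ]
    by_cases hd : d + pvDel l ≤ 0
    · have hcut : pvCut (l :: r) d = 1 := by simp [pvCut, hd]
      by_cases hb : PySem.Str.isIn "begin" ((acc ++ [l]).headD "") = true
      · rw [if_pos ⟨hd, hb⟩]; simp [hcut]
      · rw [if_neg (fun hh => hb hh.2), if_pos ⟨hd, by simpa using hb⟩]; simp [hcut]
    · have hcut : pvCut (l :: r) d = 1 + pvCut r (d + pvDel l) := by simp [pvCut, hd]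
      rw [if_neg (fun hh => hd hh.1), if_neg (fun hh => hd hh.1), ih, hcut]
      rw [show 1 + pvCut r (d + pvDel l) = pvCut r (d + pvDel l) + 1 from by omega]
      simp [List.take_succ_cons, List.drop_succ_cons]

-- B's stop search from index b+1 equals b plus the count of lines A's inner loop consumes
theorem pvBStop_eq_cut (lines : List String) (pk : Int) :
    ∀ (rest : List String) (b : Nat) (d : Int),
      rest = lines.drop b → d = (pvBPrefix [0] lines).getD b 0 - pk → b ≤ lines.length →
      pvBStop (pvBPrefix [0] lines) pk (b + 1) lines.length = b + pvCut rest d := by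
  intro rest
  induction rest with
  | nil =>
    intro b d hb hd hbn
    have hbn' : b = lines.length := by
      have := congrArg List.length hb
      simp at this
      omega
    unfold pvBStop
    simp [pvCut, hbn']
  | cons l r ih =>
    intro b d hb hd hbn
    have hblt : b < lines.length := by
      have := congrArg List.length hb
      simp at this
      omega
    have hl : lines.getD b "" = l := by
      have h0 : (lines.drop b).getD 0 "" = l := by rw [← hb]; simp
      simpa [List.getD_eq_getElem?_getD, List.getElem?_drop] using h0
    have hr : r = lines.drop (b + 1) := by
      have : (lines.drop b).tail = r := by rw [← hb]; simp
      rw [← this, List.tail_drop]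
    have hstep : (pvBPrefix [0] lines).getD (b + 1) 0
        = (pvBPrefix [0] lines).getD b 0 + pvDel l := by
      have h := pvPrefStep lines b hblt
      rw [hl] at h
      exact h
    unfold pvBStop
    have h1 : b + 1 ≤ lines.length := by omega
    rw [if_pos h1]
    by_cases hc : d + pvDel l ≤ 0
    · have : (pvBPrefix [0] lines).getD (b + 1) 0 ≤ pk := by omega
      rw [if_pos this]
      simp [pvCut, hc]
    · have : ¬ (pvBPrefix [0] lines).getD (b + 1) 0 ≤ pk := by omega
      rw [if_neg this]
      have := ih (b + 1) (d + pvDel l) hr (by omega) (by omega)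
      rw [this]
      simp [pvCut, hc]
      omega

theorem pvBOuter_eq_pvAOuter (lines : List String) :
    ∀ (m k : Nat), lines.length - k ≤ m →
      pvBOuter lines (pvBPrefix [0] lines) k = pvAOuter (lines.drop k) := by
  intro m
  induction m with
  | zero =>
    intro k hm
    have hk : ¬ k < lines.length := by omega
    rw [pvBOuter, dif_neg hk, List.drop_eq_nil_of_le (by omega), pvAOuter]
  | succ m ih =>
    intro k hm
    by_cases hk : k < lines.length
    · have hdrop : lines.drop k = lines.getD k "" :: lines.drop (k + 1) := by
        rw [List.getD_eq_getElem lines "" hk]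
        exact List.drop_eq_getElem_cons hk
      rw [pvBOuter, dif_pos hk, hdrop]
      by_cases hmark : PySem.Str.isIn "always @(*)" (lines.getD k "")
      · rw [if_pos hmark, pvAOuter, if_pos hmark]
        have hδ : (PySem.Str.count (lines.getD k "") "begin" : Int)
            - (PySem.Str.count (lines.getD k "") "end" : Int) = pvDel (lines.getD k "") := rfl
        have hd0 : pvDel (lines.getD k "")
            = (pvBPrefix [0] lines).getD (k + 1) 0 - (pvBPrefix [0] lines).getD k 0 := by
          have := pvPrefStep lines k hk
          omega
        have hstop := pvBStop_eq_cut lines ((pvBPrefix [0] lines).getD k 0)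
          (lines.drop (k + 1)) (k + 1) (pvDel (lines.getD k "")) rfl (by omega) (by omega)
        have hcutlen : pvCut (lines.drop (k + 1)) (pvDel (lines.getD k "")) ≤ lines.length - (k + 1) := by
          have hgen : ∀ (xs : List String) (d : Int), pvCut xs d ≤ xs.length := by
            intro xs
            induction xs with
            | nil => intro d; simp [pvCut]
            | cons x t iht =>
              intro d
              simp only [pvCut, List.length_cons]
              split_ifs with h
              · omega
              · have := iht (d + pvDel x); omega
          have := hgen (lines.drop (k + 1)) (pvDel (lines.getD k ""))
          simpa using this
        rw [hδ, pvAInner_eq_cut]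
        set c := pvCut (lines.drop (k + 1)) (pvDel (lines.getD k "")) with hc
        have hstop' : pvBStop (pvBPrefix [0] lines) ((pvBPrefix [0] lines).getD k 0)
            (k + 2) lines.length = k + 1 + c := by
          simpa using hstop
        simp only [hstop']
        have hblk : PySem.Str.join "\n" (PySem.List.slice lines (some ((k : Nat) : Int)) (some ((k + 1 + c : Nat) : Int)))
            = PySem.Str.join "\n" ([lines.getD k ""] ++ List.take c (List.drop (k + 1) lines)) := by
          congr 1
          rw [PySem.List.slice_natCast]
          rw [show k + 1 + c - k = c + 1 from by omega, hdrop]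
          simp [List.take_succ_cons]
        have hrec : pvBOuter lines (pvBPrefix [0] lines) (k + 1 + c)
            = pvAOuter (List.drop c (List.drop (k + 1) lines)) := by
          rw [ih (k + 1 + c) (by omega)]
          have : List.drop c (List.drop (k + 1) lines) = List.drop (k + 1 + c) lines := by
            rw [List.drop_drop]
          rw [this]
        rw [hblk, hrec]
      · rw [if_neg hmark, pvAOuter, if_neg hmark]
        exact ih (k + 1) (by omega)
    · rw [pvBOuter, dif_neg hk, List.drop_eq_nil_of_le (by omega), pvAOuter]

-- ===== VERDICT (by name: the statement is the Claim_ definition above) =====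
theorem extract_always_comb_blocks_py_spec : Claim_equal_extract_always_comb_blocks_py := by
  intro code _
  unfold Spec_extract_always_comb_blocks_py extract_always_comb_blocks_py extract_always_comb_blocks_py_alt
  rw [pvBOuter_eq_pvAOuter (PySem.Str.splitlines code) (PySem.Str.splitlines code).length 0 (by omega)]
  simp
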